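-- pv_equiv track=rewrite | github.com/hubertmucha/python_foo | f01_09_listSumN.py | listSumN
-- ===== SOURCE A (Python) =====
-- def listSumN(list,n):
--     """
--     Sum of every N-th element in the list
--
--     Parameters
--     ----------
--     l : list
--         List of the numbers (can be empty)
--     n : int
--         Number of sums that should be created for the list.
--         n > 0
--
--     Returns
--     -------
--     [sum0, sum1, ..., sum(N-1)] : list
--         where:
--             sum0 = l[0] + l[0+N] + l[0+2*N] ...
--             sum1 = l[1] + l[1+N] + l[1+2*N] ...
--             ...
--             sum(N-1) = l[N-1] + l[N-1+N] + l[N-1+2*N] ...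
--
--     """
--     sumlist = []
--     for m in range(0,n):
--         buf = 0
--         for i in range(m,len(list),n):
--             buf = buf+list[i]
--         sumlist.append(buf)
--     return sumlist
-- ===== SOURCE B (Python) =====
-- def listSumN(list, n):
--     if n <= 0:
--         return []
--     sums = [0] * n
--     for i, v in enumerate(list):
--         sums[i % n] += v
--     return sums
-- ===== Notes on version B (the rewrite author's own statement) =====
-- stated objective: idiomatic
-- what changed: Replaces A's bucket-by-bucket nested loop (outer over buckets, inner strided by n) with a single enumerate pass that routes each element into sums[i % n].
import Mathlib
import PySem

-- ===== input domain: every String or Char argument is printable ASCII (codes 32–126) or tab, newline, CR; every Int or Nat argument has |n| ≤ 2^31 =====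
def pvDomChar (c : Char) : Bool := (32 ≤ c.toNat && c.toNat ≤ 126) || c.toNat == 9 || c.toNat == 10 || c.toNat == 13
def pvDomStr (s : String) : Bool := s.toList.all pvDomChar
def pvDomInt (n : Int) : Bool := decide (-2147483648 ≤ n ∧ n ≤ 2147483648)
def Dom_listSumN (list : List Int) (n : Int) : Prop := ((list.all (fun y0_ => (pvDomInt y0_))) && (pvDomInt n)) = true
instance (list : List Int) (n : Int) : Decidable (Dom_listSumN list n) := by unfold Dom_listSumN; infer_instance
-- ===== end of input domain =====

-- B replaces A's bucket-by-bucket nested loop with a single enumerate pass routing each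
-- element into sums[i % n] (idiomatic single sweep; same asymptotic cost).

-- ===== PORT A =====
-- outer loop over buckets m in range(0, n); inner strided loop i in range(m, len(list), n);
-- list[i] is always in range here, so pyGetD with default 0 is exact.
def listSumN (list : List Int) (n : Int) : List Int :=
  (PySem.List.pyRange 0 n 1).foldl
    (fun sumlist m =>
      sumlist ++ [(PySem.List.pyRange m (PySem.List.len list) n).foldl
        (fun buf i => buf + PySem.List.pyGetD list i 0) 0])
    []

-- ===== PORT B =====
-- guard n <= 0 → []; sums = [0]*n; single pass: sums[i % n] += v (read then write, both in range).
def listSumN_alt (list : List Int) (n : Int) : List Int :=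
  if n ≤ 0 then []
  else
    (PySem.List.enumerate list).foldl
      (fun sums p =>
        PySem.List.pySetD sums (PySem.Int.mod p.1 n)
          (PySem.List.pyGetD sums (PySem.Int.mod p.1 n) 0 + p.2))
      (List.replicate n.toNat 0)

-- ===== PRECONDITION & SPEC =====
def Spec_listSumN (list : List Int) (n : Int) (out : List Int) : Prop := out = listSumN_alt list n
instance (list : List Int) (n : Int) (out : List Int) : Decidable (Spec_listSumN list n out) := by unfold Spec_listSumN; infer_instance

-- ===== CLAIM (what is proved, stated in full; the proofs are below) =====
def Claim_equal_listSumN : Prop := ∀ (list : List Int) (n : Int), Dom_listSumN list n → Spec_listSumN list n (listSumN list n)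

-- ===== LEMMAS AND PROOFS =====

-- contribution of the pair list ps (index, value) to bucket m
def csum (n : Int) (ps : List (Int × Int)) (m : Nat) : Int :=
  ((ps.filter (fun p => (PySem.Int.mod p.1 n).toNat == m)).map Prod.snd).sum

theorem csum_nil (n : Int) (m : Nat) : csum n [] m = 0 := rfl

theorem csum_cons (n : Int) (q : Int × Int) (ps : List (Int × Int)) (m : Nat) :
    csum n (q :: ps) m
      = (if (PySem.Int.mod q.1 n).toNat = m then q.2 else 0) + csum n ps m := by
  simp [csum, List.filter_cons]
  by_cases h : (PySem.Int.mod q.1 n).toNat = m <;> simp [h]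

theorem list_eq_map_range_getD (l : List Int) :
    l = (List.range l.length).map (fun m => l.getD m 0) := by
  apply List.ext_getElem
  · simp
  · intro i h1 h2
    simp only [List.getElem_map, List.getElem_range, List.getD_eq_getElem?_getD]
    simp at h1
    simp [List.getElem?_eq_getElem h1]

-- B's single pass: folding the step over an enumerated list adds csum to each slot.
theorem B_fold (n : Int) (hn : 0 < n) :
    ∀ (xs : List Int) (s : Int), 0 ≤ s → ∀ (sums : List Int), sums.length = n.toNat →
      (PySem.List.enumerate xs s).foldl
        (fun sums p =>
          PySem.List.pySetD sums (PySem.Int.mod p.1 n)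
            (PySem.List.pyGetD sums (PySem.Int.mod p.1 n) 0 + p.2)) sums
      = (List.range n.toNat).map
          (fun m => sums.getD m 0 + csum n (PySem.List.enumerate xs s) m) := by
  intro xs
  induction xs with
  | nil =>
      intro s hs sums hlen
      simp only [PySem.List.enumerate_nil, List.foldl_nil, csum_nil, add_zero]
      rw [← hlen]
      exact list_eq_map_range_getD sums
  | cons x xs ih =>
      intro s hs sums hlen
      rw [PySem.List.enumerate_cons]
      simp only [List.foldl_cons]
      have hmn0 : (0:Int) ≤ PySem.Int.mod s n := PySem.Int.mod_nonneg s hn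
      have hmlt : PySem.Int.mod s n < n := PySem.Int.mod_lt s hn
      have hj : (PySem.Int.mod s n).toNat < n.toNat := by omega
      have hstep :
          (PySem.List.pySetD sums (PySem.Int.mod s n)
            (PySem.List.pyGetD sums (PySem.Int.mod s n) 0 + x))
          = sums.set (PySem.Int.mod s n).toNat
              (sums.getD (PySem.Int.mod s n).toNat 0 + x) := by
        rw [PySem.List.pySetD_of_nonneg sums _ hmn0, PySem.List.pyGetD_of_nonneg sums 0 hmn0]
      rw [hstep]
      rw [ih (s + 1) (by omega) _ (by simp [hlen])]
      apply List.map_congr_left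
      intro m hm
      simp only [List.mem_range] at hm
      rw [csum_cons]
      have hget : (sums.set (PySem.Int.mod s n).toNat
            (sums.getD (PySem.Int.mod s n).toNat 0 + x)).getD m 0
          = if (PySem.Int.mod s n).toNat = m
            then sums.getD (PySem.Int.mod s n).toNat 0 + x else sums.getD m 0 := by
        by_cases h : (PySem.Int.mod s n).toNat = m
        · subst h
          simp [List.getD_eq_getElem?_getD, hlen, hj]
        · simp [List.getD_eq_getElem?_getD, h]
      rw [hget]
      by_cases h : (PySem.Int.mod s n).toNat = m
      · simp [h]; ring
      · simp [h]

-- the strided range of A's inner loop is the filtered full range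
theorem strided_range_eq_filter (L n : Int) (hn : 0 < n) (m : Nat) (hm : (m : Int) < n) :
    PySem.List.pyRange (m : Int) L n
      = (PySem.List.pyRange 0 L 1).filter (fun i => decide (PySem.Int.mod i n = (m : Int))) := by
  have hpw : (PySem.List.pyRange (m : Int) L n).Pairwise (· < ·) := by
    rw [PySem.List.pyRange_of_pos _ _ hn]
    refine List.Pairwise.map _ ?_ List.pairwise_lt_range
    intro a b hab
    have : n * (a : Int) < n * (b : Int) := by
      apply mul_lt_mul_of_pos_left (by exact_mod_cast hab) hn
    omega
  have hpwf : ((PySem.List.pyRange 0 L 1).filter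
      (fun i => decide (PySem.Int.mod i n = (m : Int)))).Pairwise (· < ·) :=
    List.Pairwise.sublist List.filter_sublist (PySem.List.pairwise_lt_pyRange_one 0 L)
  have hnd1 : ((PySem.List.pyRange 0 L 1).filter
      (fun i => decide (PySem.Int.mod i n = (m : Int)))).Nodup :=
    List.Nodup.sublist List.filter_sublist (PySem.List.nodup_pyRange_one 0 L)
  have hnd2 : (PySem.List.pyRange (m : Int) L n).Nodup := by
    rw [PySem.List.pyRange_of_pos _ _ hn]
    refine List.Nodup.map ?_ (List.nodup_range)
    intro a b hab
    have h3 : n * (a : Int) = n * (b : Int) := by linarith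
    have h4 : (a : Int) = (b : Int) := mul_left_cancel₀ (by omega) h3
    exact_mod_cast h4
  have hperm : ((PySem.List.pyRange 0 L 1).filter
      (fun i => decide (PySem.Int.mod i n = (m : Int)))).Perm (PySem.List.pyRange (m : Int) L n) := by
    rw [List.perm_ext_iff_of_nodup hnd1 hnd2]
    intro x
    rw [List.mem_filter, PySem.List.mem_pyRange_one, PySem.List.mem_pyRange_iff_of_pos hn,
      decide_eq_true_iff, PySem.Int.mod_eq_emod_of_pos hn]
    constructor
    · rintro ⟨⟨hx0, hxL⟩, hmod⟩
      refine ⟨?_, hxL, ?_⟩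
      · by_cases hcase : x < n
        · rw [Int.emod_eq_of_lt hx0 hcase] at hmod; omega
        · omega
      · have : x - x % n = n * (x / n) := by rw [Int.emod_def]; ring
        rw [hmod] at this
        exact ⟨x / n, this⟩
    · rintro ⟨hmx, hxL, ⟨k, hk⟩⟩
      have hx : x = (m : Int) + n * k := by omega
      refine ⟨⟨by omega, hxL⟩, ?_⟩
      rw [hx, Int.add_mul_emod_self_left, Int.emod_eq_of_lt (by omega) hm]
  have h1 := PySem.List.sorted_eq_of_perm_of_pairwise_lt (PySem.List.pyRange (m : Int) L n) _ id hperm hpwf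
  have h2 := PySem.List.sorted_eq_of_perm_of_pairwise_lt (PySem.List.pyRange (m : Int) L n) _ id (List.Perm.refl _) hpw
  exact h2.symm.trans h1

-- A's inner bucket loop computes csum over the enumerated list
theorem A_bucket (list : List Int) (n : Int) (hn : 0 < n) (m : Nat) (hm : (m : Int) < n) :
    (PySem.List.pyRange (m : Int) (PySem.List.len list) n).foldl
      (fun buf i => buf + PySem.List.pyGetD list i 0) 0
      = csum n (PySem.List.enumerate list) m := by
  rw [strided_range_eq_filter _ n hn m hm, PySem.List.foldl_add, zero_add]
  rw [csum, PySem.List.enumerate_eq_map_pyRange list 0, List.filter_map, List.map_map]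
  simp only [Function.comp_def]
  congr 1
  refine congrArg (List.map fun i => PySem.List.pyGetD list i 0) ?_
  apply List.filter_congr
  intro j hj
  rw [PySem.List.mem_pyRange_one] at hj
  have h0 : (0:Int) ≤ PySem.Int.mod j n := PySem.Int.mod_nonneg j hn
  rw [Bool.eq_iff_iff]
  simp only [decide_eq_true_iff, beq_iff_eq]
  omega

theorem main_eq (list : List Int) (n : Int) : listSumN list n = listSumN_alt list n := by
  by_cases hn0 : n ≤ 0
  · unfold listSumN listSumN_alt
    rw [PySem.List.pyRange_one_eq_nil hn0, if_pos hn0]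
    rfl
  · have hn : 0 < n := by omega
    unfold listSumN listSumN_alt
    rw [if_neg hn0]
    rw [PySem.List.foldl_append_singleton_eq_map, List.nil_append]
    rw [B_fold n hn list 0 le_rfl _ (by simp)]
    rw [PySem.List.pyRange_one 0 n]
    simp only [sub_zero, List.map_map]
    apply List.map_congr_left
    intro m hm
    simp only [List.mem_range] at hm
    have hmn : (m : Int) < n := by omega
    simp only [Function.comp_def, zero_add]
    rw [A_bucket list n hn m hmn, List.getD_replicate 0 hm]
    omega

-- ===== VERDICT (by name: the statement is the Claim_ definition above) =====
theorem listSumN_spec : Claim_equal_listSumN := by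
  intro list n _
  unfold Spec_listSumN
  exact main_eq list n
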